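-- pv_equiv track=rewrite | github.com/Flecart/prosocial-agents | external/gt-harmbench/eval/analysis/parsing.py | parse_actions_from_answer
-- ===== SOURCE A (Python) =====
-- from typing import List, Optional, Sequence, Tuple
--
-- def parse_response(answer: str) -> tuple[Optional[str], Optional[str]]:
--     """Parse a single-line model answer into raw row/column choices.
--
--     Expected format (from `AGENTS.md`):
--     "Row choice: <row_action>, Column choice: <col_action> ..."
--     """
--     if not answer:
--         return None, None
--
--     # Everything that comes after "Row choice:" is the answer section
--     row_answer = answer.split("Row choice:")[-1].strip()
--     column_split = row_answer.split(", Column choice:")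
--
--     row_choice = column_split[0].split("Row choice:")[-1].strip().split("\n")[0]
--     column_choice = column_split[-1].strip().split("\n")[0]
--
--     # Remove trailing punctuation / decoration like ".", ";", "*"
--     row_choice = row_choice.rstrip(" .;*")
--     column_choice = column_choice.rstrip(" .;*")
--
--     return row_choice or None, column_choice or None
--
-- def parse_actions_from_answer(
--     answer_text: str,
--     actions_row: Sequence[str],
--     actions_column: Sequence[str],
-- ) -> tuple[Optional[str], Optional[str]]:
--     """Extract row and column actions from the answer text using `parse_response`.
--
--     This first parses the free-form answer into raw row/column choices
--     (as in `AGENTS.md`), then matches them to the canonical entries in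
--     `actions_row` / `actions_column` in a case-insensitive way.
--     """
--     row_action: Optional[str] = None
--     col_action: Optional[str] = None
--
--     if not answer_text:
--         return row_action, col_action
--
--     parsed_row, parsed_col = parse_response(answer_text)
--
--     # Match parsed row choice to canonical row action
--     if parsed_row:
--         parsed_row_lower = parsed_row.lower()
--         # Prefer exact (case-insensitive) matches
--         for action in actions_row:
--             if action.lower() == parsed_row_lower:
--                 row_action = action
--                 break
--         # Fallback: allow substring matches if no exact match was found
--         if row_action is None:
--             for action in actions_row:
--                 a_low = action.lower()
--                 if parsed_row_lower in a_low or a_low in parsed_row_lower: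
--                     row_action = action
--                     break
--
--     # Match parsed column choice to canonical column action
--     if parsed_col:
--         parsed_col_lower = parsed_col.lower()
--         # Prefer exact (case-insensitive) matches
--         for action in actions_column:
--             if action.lower() == parsed_col_lower:
--                 col_action = action
--                 break
--         # Fallback: allow substring matches if no exact match was found
--         if col_action is None:
--             for action in actions_column:
--                 a_low = action.lower()
--                 if parsed_col_lower in a_low or a_low in parsed_col_lower:
--                     col_action = action
--                     break
--
--     return row_action, col_action
-- ===== SOURCE B (Python) =====
-- from typing import List, Optional, Sequence, Tuple
--
-- def parse_response(answer: str) -> tuple[Optional[str], Optional[str]]: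
--     """Parse a single-line model answer into raw row/column choices."""
--     if not answer:
--         return None, None
--     row_answer = answer.split("Row choice:")[-1].strip()
--     column_split = row_answer.split(", Column choice:")
--     row_choice = column_split[0].split("Row choice:")[-1].strip().split("\n")[0]
--     column_choice = column_split[-1].strip().split("\n")[0]
--     row_choice = row_choice.rstrip(" .;*")
--     column_choice = column_choice.rstrip(" .;*")
--     return row_choice or None, column_choice or None
--
-- def _match(parsed: Optional[str], actions: Sequence[str]) -> Optional[str]:
--     """Single pass: return the first exact (case-insensitive) match immediately;
--     remember the first substring match as a fallback used only if no exact hit."""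
--     if not parsed:
--         return None
--     p = parsed.lower()
--     fallback: Optional[str] = None
--     for action in actions:
--         low = action.lower()
--         if low == p:
--             return action
--         if fallback is None and (p in low or low in p):
--             fallback = action
--     return fallback
--
-- def parse_actions_from_answer(
--     answer_text: str,
--     actions_row: Sequence[str],
--     actions_column: Sequence[str],
-- ) -> tuple[Optional[str], Optional[str]]:
--     parsed_row, parsed_col = parse_response(answer_text)
--     return _match(parsed_row, actions_row), _match(parsed_col, actions_column)
-- ===== Notes on version B (the rewrite author's own statement) =====
-- stated objective: simpler
-- what changed: Replaces each duplicated two-pass matcher (exact pass, then substring pass) with one shared single-pass helper that breaks on the first exact match and keeps the first substring hit in a fallback variable, used only if no exact match exists.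
import Mathlib
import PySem

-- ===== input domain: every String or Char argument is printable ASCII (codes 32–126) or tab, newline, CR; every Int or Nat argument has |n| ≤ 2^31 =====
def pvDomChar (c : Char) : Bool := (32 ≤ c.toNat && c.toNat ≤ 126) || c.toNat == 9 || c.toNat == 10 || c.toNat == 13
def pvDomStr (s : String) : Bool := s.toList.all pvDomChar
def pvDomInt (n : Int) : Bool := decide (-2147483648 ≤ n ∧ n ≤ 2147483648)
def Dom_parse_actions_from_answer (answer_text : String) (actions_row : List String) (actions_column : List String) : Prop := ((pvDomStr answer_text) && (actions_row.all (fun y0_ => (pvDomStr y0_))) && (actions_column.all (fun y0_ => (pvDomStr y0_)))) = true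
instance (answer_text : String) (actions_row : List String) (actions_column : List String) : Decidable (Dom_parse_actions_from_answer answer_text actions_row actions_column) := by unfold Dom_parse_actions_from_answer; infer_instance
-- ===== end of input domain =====

-- B replaces A's duplicated two-pass (exact pass then substring pass) matching blocks with one
-- shared single-pass helper carrying a fallback variable: simpler decomposition, same results.

-- ===== PORT A =====
-- s.rstrip(" .;*") ported by hand (exact): drop trailing characters of that set.
def pyRstripPunct (s : String) : String :=
  String.ofList ((s.toList.reverse.dropWhile (fun c => c = ' ' ∨ c = '.' ∨ c = ';' ∨ c = '*')).reverse)

-- s.split(sep), sep a fixed nonempty literal: split? never returns none, so getD [] is exact.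
def pySplit (s sep : String) : List String := (PySem.Str.split? s sep).getD []

-- shared helper of both Pythons (identical text in Source A and Source B); split(...) with a nonempty
-- separator never returns an empty list, so the headD/getLastD defaults are unreachable.
def parse_response_helper (answer : String) : Option String × Option String :=
  if answer = "" then (none, none)
  else
    let row_answer := PySem.Str.strip ((pySplit answer "Row choice:").getLastD "")
    let column_split := pySplit row_answer ", Column choice:"
    let row_choice :=
      (pySplit
        (PySem.Str.strip ((pySplit (column_split.headD "") "Row choice:").getLastD ""))
        "\n").headD ""
    let column_choice := (pySplit (PySem.Str.strip (column_split.getLastD "")) "\n").headD ""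
    let row_choice := pyRstripPunct row_choice
    let column_choice := pyRstripPunct column_choice
    ((if row_choice = "" then none else some row_choice),
     (if column_choice = "" then none else some column_choice))

-- A's first loop: first action whose lowercase equals p
def aFindExact (p : String) : List String → Option String
  | [] => none
  | a :: rest => if PySem.Str.lower a = p then some a else aFindExact p rest

-- A's second loop: first action related to p by substring (either direction)
def aFindSub (p : String) : List String → Option String
  | [] => none
  | a :: rest =>
    let a_low := PySem.Str.lower a
    if PySem.Str.isIn p a_low || PySem.Str.isIn a_low p then some a else aFindSub p rest

-- A's matching block (applied to the row and the column lists)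
def aMatchBlock (parsed : Option String) (actions : List String) : Option String :=
  match parsed with
  | none => none
  | some s =>
    if s = "" then none  -- 'if parsed_row:' — falsy also for the empty string
    else
      let p := PySem.Str.lower s
      match aFindExact p actions with
      | some a => some a
      | none => aFindSub p actions

def parse_actions_from_answer (answer_text : String) (actions_row : List String) (actions_column : List String) : Option String × Option String :=
  if answer_text = "" then (none, none)
  else
    let parsed := parse_response_helper answer_text
    (aMatchBlock parsed.1 actions_row, aMatchBlock parsed.2 actions_column)

-- ===== PORT B =====
-- B's single loop: break on first exact match, else remember the first substring hit
def bMatchLoop (p : String) : Option String → List String → Option String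
  | fb, [] => fb
  | fb, a :: rest =>
    let low := PySem.Str.lower a
    if low = p then some a
    else bMatchLoop p
      (if fb.isNone && (PySem.Str.isIn p low || PySem.Str.isIn low p) then some a else fb) rest

def bMatch (parsed : Option String) (actions : List String) : Option String :=
  match parsed with
  | none => none
  | some s => if s = "" then none else bMatchLoop (PySem.Str.lower s) none actions

def parse_actions_from_answer_alt (answer_text : String) (actions_row : List String) (actions_column : List String) : Option String × Option String :=
  let parsed := parse_response_helper answer_text
  (bMatch parsed.1 actions_row, bMatch parsed.2 actions_column)

-- ===== PRECONDITION & SPEC =====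
def Spec_parse_actions_from_answer (answer_text : String) (actions_row : List String) (actions_column : List String) (out : Option String × Option String) : Prop := out = parse_actions_from_answer_alt answer_text actions_row actions_column
instance (answer_text : String) (actions_row : List String) (actions_column : List String) (out : Option String × Option String) : Decidable (Spec_parse_actions_from_answer answer_text actions_row actions_column out) := by unfold Spec_parse_actions_from_answer; infer_instance

-- ===== CLAIM (what is proved, stated in full; the proofs are below) =====
def Claim_equal_parse_actions_from_answer : Prop := ∀ (answer_text : String) (actions_row : List String) (actions_column : List String), Dom_parse_actions_from_answer answer_text actions_row actions_column → Spec_parse_actions_from_answer answer_text actions_row actions_column (parse_actions_from_answer answer_text actions_row actions_column)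

-- ===== LEMMAS AND PROOFS =====
theorem bMatchLoop_eq (p : String) (fb : Option String) (l : List String) :
    bMatchLoop p fb l =
      match aFindExact p l with
      | some a => some a
      | none => match fb with | some x => some x | none => aFindSub p l := by
  induction l generalizing fb with
  | nil => cases fb <;> simp [bMatchLoop, aFindExact, aFindSub]
  | cons a rest ih =>
    by_cases h : PySem.Str.lower a = p
    · simp [bMatchLoop, aFindExact, h]
    · have hstep : bMatchLoop p fb (a :: rest) =
          bMatchLoop p
            (if fb.isNone && (PySem.Str.isIn p (PySem.Str.lower a) || PySem.Str.isIn (PySem.Str.lower a) p)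
             then some a else fb) rest := by
        simp only [bMatchLoop]
        rw [if_neg h]
      have he : aFindExact p (a :: rest) = aFindExact p rest := by
        simp only [aFindExact]; rw [if_neg h]
      have hsub : aFindSub p (a :: rest) =
          if (PySem.Str.isIn p (PySem.Str.lower a) || PySem.Str.isIn (PySem.Str.lower a) p)
          then some a else aFindSub p rest := by
        simp only [aFindSub]
      rw [hstep, ih, he, hsub]
      cases fb with
      | some x => simp
      | none =>
        cases hb : (PySem.Str.isIn p (PySem.Str.lower a) || PySem.Str.isIn (PySem.Str.lower a) p) with
        | true => cases aFindExact p rest <;> simp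
        | false => cases aFindExact p rest <;> simp

theorem bMatch_eq (parsed : Option String) (actions : List String) :
    bMatch parsed actions = aMatchBlock parsed actions := by
  cases parsed with
  | none => rfl
  | some s =>
    by_cases h : s = ""
    · simp [bMatch, aMatchBlock, h]
    · simp [bMatch, aMatchBlock, h, bMatchLoop_eq]

-- ===== VERDICT (by name: the statement is the Claim_ definition above) =====
theorem parse_actions_from_answer_spec : Claim_equal_parse_actions_from_answer := by
  intro t r c _
  unfold Spec_parse_actions_from_answer parse_actions_from_answer parse_actions_from_answer_alt
  by_cases h : t = ""
  · simp [h, parse_response_helper, bMatch]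
  · simp [h, bMatch_eq]
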